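-- pv_equiv track=rewrite | github.com/CorentinCLERO/concours_algo_grid | solvers/solver_dataset_4.py | simulate_gain_rect
-- ===== SOURCE A (Python) =====
-- from typing import List, Optional, Tuple
--
-- Grid = List[List[int]]
--
-- def simulate_gain_rect(grid: Grid, target: Grid, x1: int, y1: int, x2: int, y2: int, color: int) -> int:
--     gain = 0
--     for y in range(y1, y2 + 1):
--         row = grid[y]
--         targ = target[y]
--         for x in range(x1, x2 + 1):
--             before = 1 if row[x] == targ[x] else 0
--             after = 1 if color == targ[x] else 0
--             gain += after - before
--     return gain
-- ===== SOURCE B (Python) =====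
-- def simulate_gain_rect(grid, target, x1, y1, x2, y2, color):
--     # Divide and conquer: split the rectangle in half (rows, then columns)
--     # down to single cells; gain of a cell = (match after recolor) - (match before).
--     if y2 < y1 or x2 < x1:
--         return 0
--     if y1 == y2 and x1 == x2:
--         t = target[y1][x1]
--         return (1 if color == t else 0) - (1 if grid[y1][x1] == t else 0)
--     if y1 < y2:
--         m = (y1 + y2) // 2
--         return (simulate_gain_rect(grid, target, x1, y1, x2, m, color)
--                 + simulate_gain_rect(grid, target, x1, m + 1, x2, y2, color))
--     m = (x1 + x2) // 2
--     return (simulate_gain_rect(grid, target, x1, y1, m, y2, color)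
--             + simulate_gain_rect(grid, target, m + 1, y1, x2, y2, color))
-- ===== Notes on version B (the rewrite author's own statement) =====
-- stated objective: alternative
-- what changed: Replaces A's nested row/column loops with a fused accumulator by a divide-and-conquer recursion that splits the rectangle in half (rows first, then columns) down to single cells and adds the two halves' gains.
import Mathlib
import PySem

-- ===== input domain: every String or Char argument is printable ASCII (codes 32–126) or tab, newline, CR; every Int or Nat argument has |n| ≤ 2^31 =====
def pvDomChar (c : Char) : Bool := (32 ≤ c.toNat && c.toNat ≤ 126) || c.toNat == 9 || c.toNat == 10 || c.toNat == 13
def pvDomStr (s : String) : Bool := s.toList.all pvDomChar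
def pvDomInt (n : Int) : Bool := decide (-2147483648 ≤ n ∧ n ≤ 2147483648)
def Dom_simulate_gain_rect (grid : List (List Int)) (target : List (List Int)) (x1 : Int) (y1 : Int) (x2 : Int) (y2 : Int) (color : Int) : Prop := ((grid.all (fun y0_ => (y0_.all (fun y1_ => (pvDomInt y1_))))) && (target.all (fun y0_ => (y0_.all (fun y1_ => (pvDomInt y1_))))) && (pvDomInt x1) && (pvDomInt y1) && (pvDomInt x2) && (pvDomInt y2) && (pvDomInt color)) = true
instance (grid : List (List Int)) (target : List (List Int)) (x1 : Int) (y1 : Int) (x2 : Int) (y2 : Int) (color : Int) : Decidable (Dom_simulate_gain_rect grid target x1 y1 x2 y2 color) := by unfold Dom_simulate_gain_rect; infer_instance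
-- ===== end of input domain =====

-- B replaces A's nested row/column loops with a divide-and-conquer recursion that
-- splits the rectangle in half down to single cells (objective: alternative, same cost).

-- ===== PORT A =====
def simulate_gain_rect (grid : List (List Int)) (target : List (List Int)) (x1 : Int) (y1 : Int) (x2 : Int) (y2 : Int) (color : Int) : Int :=
  (PySem.List.pyRange y1 (y2 + 1) 1).foldl (fun gain y =>
    let row := PySem.List.pyGetD grid y []
    let targ := PySem.List.pyGetD target y []
    (PySem.List.pyRange x1 (x2 + 1) 1).foldl (fun gain x =>
      let before : Int := if PySem.List.pyGetD row x 0 == PySem.List.pyGetD targ x 0 then 1 else 0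
      let after : Int := if color == PySem.List.pyGetD targ x 0 then 1 else 0
      gain + (after - before)) gain) 0

-- ===== PORT B =====
-- B's recursion, written with structural fuel = the termination measure (fuel only
-- makes the same computation total; the branch structure is Source B's).
def pvGo (grid target : List (List Int)) (color : Int) : Nat → Int → Int → Int → Int → Int
  | 0, _, _, _, _ => 0
  | fuel + 1, x1, y1, x2, y2 =>
    if y2 < y1 ∨ x2 < x1 then 0
    else if y1 = y2 ∧ x1 = x2 then
      let t := PySem.List.pyGetD (PySem.List.pyGetD target y1 []) x1 0
      (if color == t then 1 else 0) - (if PySem.List.pyGetD (PySem.List.pyGetD grid y1 []) x1 0 == t then 1 else 0)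
    else if y1 < y2 then
      let m := PySem.Int.floordiv (y1 + y2) 2
      pvGo grid target color fuel x1 y1 x2 m + pvGo grid target color fuel x1 (m + 1) x2 y2
    else
      let m := PySem.Int.floordiv (x1 + x2) 2
      pvGo grid target color fuel x1 y1 m y2 + pvGo grid target color fuel (m + 1) y1 x2 y2

def simulate_gain_rect_alt (grid : List (List Int)) (target : List (List Int)) (x1 : Int) (y1 : Int) (x2 : Int) (y2 : Int) (color : Int) : Int :=
  pvGo grid target color ((y2 + 1 - y1).toNat + (x2 + 1 - x1).toNat) x1 y1 x2 y2

-- ===== PRECONDITION & SPEC =====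
-- Pre_ excludes exactly the inputs on which Python A raises IndexError (some y in
-- range(y1, y2+1) or x in range(x1, x2+1) out of range for grid/target or their rows,
-- counting Python's negative-index wraparound as in range).
def pvRowOK (row : List Int) (x1 x2 : Int) : Bool :=
  decide (x2 < x1) || (decide (-(row.length : Int) ≤ x1) && decide (x2 < (row.length : Int)))

def pvMatOK (m : List (List Int)) (y1 y2 x1 x2 : Int) : Bool :=
  decide (-(m.length : Int) ≤ y1) && decide (y2 < (m.length : Int)) &&
  (List.range m.length).all (fun j =>
    !(decide (y1 ≤ (j : Int) ∧ (j : Int) ≤ y2) ||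
      decide (y1 ≤ (j : Int) - m.length ∧ (j : Int) - m.length ≤ y2)) ||
    pvRowOK (m.getD j []) x1 x2)

def Pre_simulate_gain_rect (grid : List (List Int)) (target : List (List Int)) (x1 : Int) (y1 : Int) (x2 : Int) (y2 : Int) (color : Int) : Prop :=
  (decide (y2 < y1) || (pvMatOK grid y1 y2 x1 x2 && pvMatOK target y1 y2 x1 x2)) = true
instance (grid : List (List Int)) (target : List (List Int)) (x1 : Int) (y1 : Int) (x2 : Int) (y2 : Int) (color : Int) : Decidable (Pre_simulate_gain_rect grid target x1 y1 x2 y2 color) := by unfold Pre_simulate_gain_rect; infer_instance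

def pvWitness_simulate_gain_rect : List (List Int) × List (List Int) × Int × Int × Int × Int × Int :=
  ([[0, 1], [2, 3]], [[1, 1], [2, 0]], 0, 0, 1, 1, 1)

def Spec_simulate_gain_rect (grid : List (List Int)) (target : List (List Int)) (x1 : Int) (y1 : Int) (x2 : Int) (y2 : Int) (color : Int) (out : Int) : Prop := out = simulate_gain_rect_alt grid target x1 y1 x2 y2 color
instance (grid : List (List Int)) (target : List (List Int)) (x1 : Int) (y1 : Int) (x2 : Int) (y2 : Int) (color : Int) (out : Int) : Decidable (Spec_simulate_gain_rect grid target x1 y1 x2 y2 color out) := by unfold Spec_simulate_gain_rect; infer_instance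

-- ===== CLAIM (what is proved, stated in full; the proofs are below) =====
def Claim_equal_simulate_gain_rect : Prop := ∀ (grid : List (List Int)) (target : List (List Int)) (x1 : Int) (y1 : Int) (x2 : Int) (y2 : Int) (color : Int), Dom_simulate_gain_rect grid target x1 y1 x2 y2 color → Pre_simulate_gain_rect grid target x1 y1 x2 y2 color → Spec_simulate_gain_rect grid target x1 y1 x2 y2 color (simulate_gain_rect grid target x1 y1 x2 y2 color)

-- ===== LEMMAS AND PROOFS =====
-- gain of a single cell, and the double sum both programs compute
def pvCell (grid target : List (List Int)) (color y x : Int) : Int :=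
  (if color == PySem.List.pyGetD (PySem.List.pyGetD target y []) x 0 then 1 else 0)
    - (if PySem.List.pyGetD (PySem.List.pyGetD grid y []) x 0 == PySem.List.pyGetD (PySem.List.pyGetD target y []) x 0 then 1 else 0)

def pvF (grid target : List (List Int)) (color x1 y1 x2 y2 : Int) : Int :=
  ((PySem.List.pyRange y1 (y2 + 1) 1).map (fun y =>
    ((PySem.List.pyRange x1 (x2 + 1) 1).map (pvCell grid target color y)).sum)).sum

lemma pv_nested (f : Int → Int → Int) (ys xs : List Int) (a : Int) :
    ys.foldl (fun g y => xs.foldl (fun g x => g + f y x) g) a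
      = a + (ys.map (fun y => (xs.map (f y)).sum)).sum := by
  induction ys generalizing a with
  | nil => simp
  | cons h t ih =>
    simp only [List.foldl_cons, PySem.List.foldl_add, List.map_cons, List.sum_cons]
    ring

lemma pvA_eq (grid target : List (List Int)) (x1 y1 x2 y2 color : Int) :
    simulate_gain_rect grid target x1 y1 x2 y2 color = pvF grid target color x1 y1 x2 y2 := by
  show (PySem.List.pyRange y1 (y2 + 1) 1).foldl (fun gain y =>
      (PySem.List.pyRange x1 (x2 + 1) 1).foldl
        (fun gain x => gain + pvCell grid target color y x) gain) 0
    = pvF grid target color x1 y1 x2 y2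
  rw [pv_nested]
  simp [pvF]

lemma pvF_split_y (grid target : List (List Int)) (color x1 y1 m y2 x2 : Int)
    (h1 : y1 ≤ m) (h2 : m ≤ y2) :
    pvF grid target color x1 y1 x2 y2 = pvF grid target color x1 y1 x2 m
      + pvF grid target color x1 (m + 1) x2 y2 := by
  unfold pvF
  rw [PySem.List.pyRange_one_append y1 (m + 1) (y2 + 1) (by omega) (by omega)]
  simp

lemma pvF_split_x (grid target : List (List Int)) (color x1 m x2 y1 y2 : Int)
    (h1 : x1 ≤ m) (h2 : m ≤ x2) :
    pvF grid target color x1 y1 x2 y2 = pvF grid target color x1 y1 m y2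
      + pvF grid target color (m + 1) y1 x2 y2 := by
  unfold pvF
  rw [PySem.List.pyRange_one_append x1 (m + 1) (x2 + 1) (by omega) (by omega)]
  simp only [List.map_append, List.sum_append]
  rw [← List.sum_map_add]

lemma pvGo_eq (grid target : List (List Int)) (color : Int) (fuel : Nat) :
    ∀ (x1 y1 x2 y2 : Int), (y2 + 1 - y1).toNat + (x2 + 1 - x1).toNat ≤ fuel ∨ y2 < y1 ∨ x2 < x1 →
      pvGo grid target color fuel x1 y1 x2 y2 = pvF grid target color x1 y1 x2 y2 := by
  induction fuel with
  | zero =>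
    intro x1 y1 x2 y2 h
    have hlt : y2 < y1 ∨ x2 < x1 := by omega
    rw [pvGo]
    unfold pvF
    rcases hlt with h' | h'
    · rw [PySem.List.pyRange_one_eq_nil (by omega : y2 + 1 ≤ y1)]; simp
    · rw [PySem.List.pyRange_one_eq_nil (by omega : x2 + 1 ≤ x1)]; simp
  | succ fuel ih =>
    intro x1 y1 x2 y2 h
    rw [pvGo]
    by_cases h0 : y2 < y1 ∨ x2 < x1
    · simp only [h0, if_pos]
      unfold pvF
      rcases h0 with h' | h'
      · rw [PySem.List.pyRange_one_eq_nil (by omega : y2 + 1 ≤ y1)]; simp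
      · rw [PySem.List.pyRange_one_eq_nil (by omega : x2 + 1 ≤ x1)]; simp
    · simp only [h0, if_neg, not_false_iff]
      by_cases h1 : y1 = y2 ∧ x1 = x2
      · simp only [h1, if_pos]
        obtain ⟨hy, hx⟩ := h1
        subst hy hx
        unfold pvF
        rw [PySem.List.pyRange_one_singleton, PySem.List.pyRange_one_singleton]
        simp [pvCell]
      · simp only [h1, if_neg, not_false_iff]
        by_cases h2 : y1 < y2
        · simp only [h2, if_pos]
          have hm := PySem.Int.floordiv_two_mid_bounds (le_of_lt h2)
          have hlt : PySem.Int.floordiv (y1 + y2) 2 < y2 := by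
            rw [PySem.Int.floordiv_eq_ediv_of_pos (by norm_num : (0:Int) < 2)]
            omega
          rw [ih _ _ _ _ (by left; omega), ih _ _ _ _ (by left; omega)]
          exact (pvF_split_y grid target color x1 y1 _ y2 x2 hm.1 (le_of_lt hlt)).symm
        · simp only [h2, if_neg, not_false_iff]
          have hx : x1 < x2 := by
            rcases lt_or_eq_of_le (by omega : x1 ≤ x2) with hlt | heq
            · exact hlt
            · exact absurd ⟨by omega, heq⟩ h1
          have hm := PySem.Int.floordiv_two_mid_bounds (le_of_lt hx)
          have hlt : PySem.Int.floordiv (x1 + x2) 2 < x2 := by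
            rw [PySem.Int.floordiv_eq_ediv_of_pos (by norm_num : (0:Int) < 2)]
            omega
          rw [ih _ _ _ _ (by left; omega), ih _ _ _ _ (by left; omega)]
          exact (pvF_split_x grid target color x1 _ x2 y1 y2 hm.1 (le_of_lt hlt)).symm

lemma pvB_eq (grid target : List (List Int)) (x1 y1 x2 y2 color : Int) :
    simulate_gain_rect_alt grid target x1 y1 x2 y2 color = pvF grid target color x1 y1 x2 y2 := by
  exact pvGo_eq grid target color _ x1 y1 x2 y2 (Or.inl le_rfl)

-- ===== VERDICT (by name: the statement is the Claim_ definition above) =====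
theorem simulate_gain_rect_spec : Claim_equal_simulate_gain_rect := by
  intro grid target x1 y1 x2 y2 color _ _
  show simulate_gain_rect grid target x1 y1 x2 y2 color = simulate_gain_rect_alt grid target x1 y1 x2 y2 color
  rw [pvA_eq, pvB_eq]
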